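-- pv_equiv track=rewrite | github.com/TeeKay-FourTwentyOne/math | ramsey-book-graphs/n24_fast_sa.py | compute_all_deltas
-- ===== SOURCE A (Python) =====
-- m = 47
--
-- def compute_all_deltas(S_set):
--     """Compute Delta(S, S, d) for all d in {0,...,m-1}."""
--     indicator = [0] * m
--     for x in S_set:
--         indicator[x % m] = 1
--     deltas = [0] * m
--     for d in range(1, m):
--         count = 0
--         for x in range(m):
--             if indicator[x] and indicator[(x - d) % m]:
--                 count += 1
--         deltas[d] = count
--     return deltas
-- ===== SOURCE B (Python) =====
-- m = 47
--
-- def compute_all_deltas(S_set):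
--     """Compute Delta(S, S, d) for all d in {0,...,m-1}."""
--     present = sorted({x % m for x in S_set})
--     deltas = [0] * m
--     for a in present:
--         for b in present:
--             if a != b:
--                 deltas[(a - b) % m] += 1
--     return deltas
-- ===== Notes on version B (the rewrite author's own statement) =====
-- stated objective: alternative
-- what changed: B drops the indicator array entirely: it builds the sorted set of residues x % 47 and double-loops over ordered pairs of distinct present residues, incrementing deltas[(a-b)%47], instead of rescanning all 47 positions for each offset d.
import Mathlib
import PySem

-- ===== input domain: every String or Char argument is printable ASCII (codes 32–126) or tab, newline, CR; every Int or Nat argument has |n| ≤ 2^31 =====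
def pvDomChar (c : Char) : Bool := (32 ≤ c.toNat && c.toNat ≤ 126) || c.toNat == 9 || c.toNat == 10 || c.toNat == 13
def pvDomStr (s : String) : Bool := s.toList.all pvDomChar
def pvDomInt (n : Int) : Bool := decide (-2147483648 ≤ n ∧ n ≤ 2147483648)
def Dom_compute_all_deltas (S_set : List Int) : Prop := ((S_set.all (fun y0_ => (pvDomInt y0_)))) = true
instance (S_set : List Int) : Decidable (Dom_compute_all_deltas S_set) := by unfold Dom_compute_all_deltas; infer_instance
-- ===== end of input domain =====

-- B drops the indicator array: it builds sorted({x % 47}) once and double-loops over ordered pairs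
-- of distinct present residues, incrementing deltas[(a-b) % 47]; objective: alternative traversal, same result.

-- ===== PORT A =====
def compute_all_deltas (S_set : List Int) : List Int :=
  let indicator := S_set.foldl (fun ind x => PySem.List.pySetD ind (PySem.Int.mod x 47) 1)
    (List.replicate 47 (0 : Int))
  (PySem.List.pyRange 1 47 1).foldl (fun deltas d =>
      let count := (PySem.List.pyRange 0 47 1).foldl (fun count x =>
        if (PySem.List.pyGetD indicator x 0 != 0) &&
           (PySem.List.pyGetD indicator (PySem.Int.mod (x - d) 47) 0 != 0)
        then count + 1 else count) (0 : Int)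
      PySem.List.pySetD deltas d count)
    (List.replicate 47 (0 : Int))

-- ===== PORT B =====
def compute_all_deltas_alt (S_set : List Int) : List Int :=
  let present := PySem.List.sorted
    (PySem.Set.ofList (S_set.map (fun x => PySem.Int.mod x 47))) (fun x => x) false
  present.foldl (fun deltas a =>
      present.foldl (fun deltas b =>
        if a != b then
          PySem.List.pySetD deltas (PySem.Int.mod (a - b) 47)
            (PySem.List.pyGetD deltas (PySem.Int.mod (a - b) 47) 0 + 1)
        else deltas) deltas)
    (List.replicate 47 (0 : Int))

-- ===== PRECONDITION & SPEC =====
def Spec_compute_all_deltas (S_set : List Int) (out : List Int) : Prop := out = compute_all_deltas_alt S_set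
instance (S_set : List Int) (out : List Int) : Decidable (Spec_compute_all_deltas S_set out) := by unfold Spec_compute_all_deltas; infer_instance

-- ===== CLAIM (what is proved, stated in full; the proofs are below) =====
def Claim_equal_compute_all_deltas : Prop := ∀ (S_set : List Int), Dom_compute_all_deltas S_set → Spec_compute_all_deltas S_set (compute_all_deltas S_set)

-- ===== LEMMAS AND PROOFS =====

lemma pvFoldLen {α : Type} (g : List Int → α → List Int)
    (h : ∀ acc x, (g acc x).length = acc.length) :
    ∀ (L : List α) (init : List Int), (L.foldl g init).length = init.length := by
  intro L
  induction L with
  | nil => intro init; rfl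
  | cons a L ih => intro init; rw [List.foldl_cons, ih, h]

lemma pvFoldSet (c : Int → Int) (i : Nat) :
    ∀ (L : List Int) (init : List Int), (∀ d ∈ L, 0 ≤ d) →
      (L.foldl (fun acc d => PySem.List.pySetD acc d (c d)) init).getD i 0 =
        if ((i : Int) ∈ L ∧ i < init.length) then c (i : Int) else init.getD i 0 := by
  intro L
  induction L with
  | nil => intro init h; simp
  | cons d L ih =>
    intro init h
    rw [List.foldl_cons, PySem.List.pySetD_of_nonneg _ _ (h d (by simp)),
      ih _ (fun x hx => h x (by simp [hx]))]
    have hd0 : 0 ≤ d := h d (by simp)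
    simp only [List.length_set, List.getD_eq_getElem?_getD, List.getElem?_set, List.mem_cons]
    by_cases hm : (i : Int) ∈ L
    · simp only [hm, or_true, true_and]
      split_ifs with h1 h2 h3 <;> try rfl
      · omega
      · have : init[i]? = none := by rw [List.getElem?_eq_none]; omega
        simp [this]
    · by_cases hid : (i : Int) = d
      · have ht : d.toNat = i := by omega
        simp only [hid, true_or, true_and, ht]
        split_ifs with h1 h2 <;> try omega
        · simp
        · have : init[i]? = none := by rw [List.getElem?_eq_none]; omega
          simp [this]
      · have ht : d.toNat ≠ i := by omega
        simp [hm, hid, ht]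

lemma pvFoldIncr (i : Nat) :
    ∀ (L : List Int) (init : List Int), (∀ d ∈ L, 0 ≤ d) →
      (L.foldl (fun acc d => PySem.List.pySetD acc d (PySem.List.pyGetD acc d 0 + 1)) init).getD i 0 =
        init.getD i 0 + (if i < init.length then ((L.count (i : Int) : Int)) else 0) := by
  intro L
  induction L with
  | nil => intro init h; simp
  | cons d L ih =>
    intro init h
    rw [List.foldl_cons, PySem.List.pySetD_of_nonneg _ _ (h d (by simp)),
      PySem.List.pyGetD_of_nonneg _ _ (h d (by simp)),
      ih _ (fun x hx => h x (by simp [hx]))]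
    have hd0 : 0 ≤ d := h d (by simp)
    rw [List.count_cons]
    simp only [List.length_set, List.getD_eq_getElem?_getD, List.getElem?_set]
    by_cases hid : (i : Int) = d
    · have ht : d.toNat = i := by omega
      simp only [ht, if_true]
      by_cases hlen : i < init.length
      · simp only [hlen, if_true, List.getElem?_eq_getElem hlen, hid]
        simp
        ring
      · simp [hlen]
    · have ht : d.toNat ≠ i := by omega
      simp [ht, show ¬ d = (i:Int) by omega]

lemma pvFoldAdd {α : Type} (g : List Int → α → List Int) (h : α → Int) (i : Nat)
    (hlen : ∀ del a, (g del a).length = del.length)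
    (hval : ∀ del a, (g del a).getD i 0 = del.getD i 0 + if i < del.length then h a else 0) :
    ∀ (L : List α) (init : List Int),
      (L.foldl g init).getD i 0 = init.getD i 0 + (if i < init.length then (L.map h).sum else 0) := by
  intro L
  induction L with
  | nil => intro init; simp
  | cons a L ih =>
    intro init
    rw [List.foldl_cons, ih, hval, hlen]
    split_ifs with h
    · simp
      ring
    · simp

lemma pvCore (ind : List Int) (P : List Int)
    (hPmem : ∀ x : Int, x ∈ P ↔ 0 ≤ x ∧ x < 47 ∧ (PySem.List.pyGetD ind x 0 != 0) = true)
    (hPnodup : P.Nodup) :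
    (PySem.List.pyRange 1 47 1).foldl (fun deltas d =>
        PySem.List.pySetD deltas d
          ((PySem.List.pyRange 0 47 1).foldl (fun count x =>
            if (PySem.List.pyGetD ind x 0 != 0) &&
               (PySem.List.pyGetD ind (PySem.Int.mod (x - d) 47) 0 != 0)
            then count + 1 else count) (0 : Int)))
      (List.replicate 47 (0 : Int)) =
    P.foldl (fun deltas a =>
        P.foldl (fun deltas b =>
          if a != b then
            PySem.List.pySetD deltas (PySem.Int.mod (a - b) 47)
              (PySem.List.pyGetD deltas (PySem.Int.mod (a - b) 47) 0 + 1)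
          else deltas) deltas)
      (List.replicate 47 (0 : Int)) := by
  -- replace B's 'a ≠ b' guard by the equivalent '(a-b) % 47 ≠ 0' guard (elements of P lie in [0,47))
  have hguard : ∀ a b : Int, a ∈ P → b ∈ P →
      ((a != b) = (PySem.Int.mod (a - b) 47 != 0)) := by
    intro a b ha hb
    obtain ⟨ha0, ha47, -⟩ := (hPmem a).mp ha
    obtain ⟨hb0, hb47, -⟩ := (hPmem b).mp hb
    rw [PySem.Int.mod_eq_emod_of_pos (by norm_num : (0:Int) < 47)]
    by_cases h : a = b
    · subst h
      simp only [bne_self_eq_false, sub_self]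
      norm_num
    · have h2 : (a - b) % 47 ≠ 0 := by omega
      rw [show (a != b) = true from by simpa using h,
        show ((a - b) % 47 != 0) = true from by simpa using h2]
  have hB : P.foldl (fun deltas a =>
        P.foldl (fun deltas b =>
          if a != b then
            PySem.List.pySetD deltas (PySem.Int.mod (a - b) 47)
              (PySem.List.pyGetD deltas (PySem.Int.mod (a - b) 47) 0 + 1)
          else deltas) deltas)
      (List.replicate 47 (0 : Int)) =
      P.foldl (fun deltas a =>
        P.foldl (fun deltas b =>
          if PySem.Int.mod (a - b) 47 != 0 then
            PySem.List.pySetD deltas (PySem.Int.mod (a - b) 47)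
              (PySem.List.pyGetD deltas (PySem.Int.mod (a - b) 47) 0 + 1)
          else deltas) deltas)
      (List.replicate 47 (0 : Int)) := by
    apply PySem.List.foldl_congr_mem
    intro acc a ha
    apply PySem.List.foldl_congr_mem
    intro acc' b hb
    rw [hguard a b ha hb]
  rw [hB]
  clear hB hguard
  -- lengths
  have hlenA : ((PySem.List.pyRange 1 47 1).foldl (fun deltas d =>
      PySem.List.pySetD deltas d
        ((PySem.List.pyRange 0 47 1).foldl (fun count x =>
          if (PySem.List.pyGetD ind x 0 != 0) &&
             (PySem.List.pyGetD ind (PySem.Int.mod (x - d) 47) 0 != 0)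
          then count + 1 else count) (0 : Int)))
      (List.replicate 47 (0 : Int))).length = 47 := by
    rw [pvFoldLen _ (fun acc x => PySem.List.length_pySetD _ _ _), List.length_replicate]
  have hinlen : ∀ (del : List Int) (a : Int),
      (P.foldl (fun deltas b =>
        if PySem.Int.mod (a - b) 47 != 0 then
          PySem.List.pySetD deltas (PySem.Int.mod (a - b) 47)
            (PySem.List.pyGetD deltas (PySem.Int.mod (a - b) 47) 0 + 1)
        else deltas) del).length = del.length := by
    intro del a
    refine pvFoldLen _ (fun acc b => ?_) P del
    split
    · rw [PySem.List.length_pySetD]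
    · rfl
  have hlenB : (P.foldl (fun deltas a =>
      P.foldl (fun deltas b =>
        if PySem.Int.mod (a - b) 47 != 0 then
          PySem.List.pySetD deltas (PySem.Int.mod (a - b) 47)
            (PySem.List.pyGetD deltas (PySem.Int.mod (a - b) 47) 0 + 1)
        else deltas) deltas)
      (List.replicate 47 (0 : Int))).length = 47 := by
    rw [pvFoldLen _ (fun acc a => hinlen _ _), List.length_replicate]
  have hnonnegA : ∀ d ∈ PySem.List.pyRange 1 47 1, (0:Int) ≤ d := by
    intro d hd
    rw [PySem.List.mem_pyRange_one] at hd
    omega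
  apply List.ext_getElem (by rw [hlenA, hlenB])
  intro i hi1 hi2
  rw [hlenA] at hi1
  rw [← List.getD_eq_getElem (d := 0), ← List.getD_eq_getElem (d := 0)]
  -- A side: inner loop is a countP
  simp only [PySem.List.foldl_count_if, zero_add]
  rw [pvFoldSet _ i _ _ hnonnegA]
  -- B side: outer loop adds per-a pair counts
  have hKnn : ∀ (a : Int), ∀ dd ∈ (P.map (fun b => PySem.Int.mod (a - b) 47)).filter
      (fun dd => dd != 0), (0:Int) ≤ dd := by
    intro a dd hdd
    simp only [List.mem_filter, List.mem_map] at hdd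
    obtain ⟨⟨b, hb, rfl⟩, -⟩ := hdd
    exact PySem.Int.mod_nonneg _ (by norm_num)
  have hval : ∀ (del : List Int) (a : Int),
      (P.foldl (fun deltas b =>
          if PySem.Int.mod (a - b) 47 != 0 then
            PySem.List.pySetD deltas (PySem.Int.mod (a - b) 47)
              (PySem.List.pyGetD deltas (PySem.Int.mod (a - b) 47) 0 + 1)
          else deltas) del).getD i 0 =
      del.getD i 0 + (if i < del.length then
        ((((P.map (fun b => PySem.Int.mod (a - b) 47)).filter (fun dd => dd != 0)).count (i:Int) : Int))
        else 0) := by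
    intro del a
    have e1 : (((P.map (fun b => PySem.Int.mod (a - b) 47)).filter (fun dd => dd != 0)).foldl
          (fun acc dd => PySem.List.pySetD acc dd (PySem.List.pyGetD acc dd 0 + 1)) del) =
        P.foldl (fun deltas b =>
            if PySem.Int.mod (a - b) 47 != 0 then
              PySem.List.pySetD deltas (PySem.Int.mod (a - b) 47)
                (PySem.List.pyGetD deltas (PySem.Int.mod (a - b) 47) 0 + 1)
            else deltas) del := by
      rw [List.foldl_filter, List.foldl_map]
    rw [← e1, pvFoldIncr i _ del (hKnn a)]
  rw [pvFoldAdd _ _ i (fun del a => hinlen _ _) hval]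
  simp only [List.length_replicate, List.getD_replicate _ hi1, hi1, and_true, if_true, zero_add]
  by_cases hi0 : i = 0
  · subst hi0
    rw [if_neg (by rw [PySem.List.mem_pyRange_one]; omega)]
    rw [List.sum_eq_zero]
    intro x hx
    simp only [List.mem_map] at hx
    obtain ⟨a, ha, rfl⟩ := hx
    rw [Int.natCast_eq_zero, List.count_eq_zero]
    intro hmem
    simp only [List.mem_filter, Nat.cast_zero] at hmem
    exact absurd hmem.2 (by simp)
  · -- 1 ≤ i < 47
    have hi1' : 1 ≤ i := Nat.one_le_iff_ne_zero.mpr hi0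
    rw [if_pos (show (i:Int) ∈ PySem.List.pyRange 1 47 1 by
      rw [PySem.List.mem_pyRange_one]; omega)]
    -- rewrite each summand to an indicator of membership
    have hsum : (P.map (fun a =>
        ((((P.map (fun b => PySem.Int.mod (a - b) 47)).filter (fun dd => dd != 0)).count (i:Int) : Int)))) =
        (P.map (fun a => if (decide (PySem.Int.mod (a - (i:Int)) 47 ∈ P)) = true then (1:Int) else 0)) := by
      apply List.map_congr_left
      intro a ha
      obtain ⟨ha0, ha47, -⟩ := (hPmem a).mp ha
      rw [List.count_filter (by simp; omega), List.count_eq_countP, List.countP_map]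
      have hcongr : List.countP ((fun x => x == (i:Int)) ∘ fun b => PySem.Int.mod (a - b) 47) P =
          List.countP (fun b => b == PySem.Int.mod (a - (i:Int)) 47) P := by
        apply List.countP_congr
        intro b hb
        obtain ⟨hb0, hb47, -⟩ := (hPmem b).mp hb
        simp only [Function.comp_apply, beq_iff_eq,
          PySem.Int.mod_eq_emod_of_pos (by norm_num : (0:Int) < 47)]
        omega
      rw [hcongr, ← List.count_eq_countP]
      by_cases hmem : PySem.Int.mod (a - (i:Int)) 47 ∈ P
      · rw [List.count_eq_one_of_mem hPnodup hmem, if_pos (by simpa using hmem)]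
        rfl
      · rw [List.count_eq_zero.mpr hmem, if_neg (by simpa using hmem)]
        rfl
    rw [hsum, PySem.List.sum_map_ite_one_zero, Nat.cast_inj]
    have hperm : P.Perm ((PySem.List.pyRange 0 47 1).filter (fun x => decide (x ∈ P))) := by
      rw [List.perm_ext_iff_of_nodup hPnodup ((PySem.List.nodup_pyRange_one 0 47).filter _)]
      intro a
      simp only [List.mem_filter, decide_eq_true_eq, PySem.List.mem_pyRange_one]
      constructor
      · intro ha
        obtain ⟨h0, h47, -⟩ := (hPmem a).mp ha
        exact ⟨⟨h0, h47⟩, ha⟩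
      · exact fun h => h.2
    rw [hperm.countP_eq, List.countP_filter]
    apply List.countP_congr
    intro x hx
    rw [PySem.List.mem_pyRange_one] at hx
    simp only [Bool.and_eq_true, decide_eq_true_eq, hPmem]
    constructor
    · rintro ⟨h1, h2⟩
      exact ⟨⟨PySem.Int.mod_nonneg _ (by norm_num), PySem.Int.mod_lt _ (by norm_num), h2⟩,
        hx.1, hx.2, h1⟩
    · rintro ⟨⟨-, -, h2⟩, -, -, h1⟩
      exact ⟨h1, h2⟩

-- B's present list is exactly the residues flagged by A's indicator, without duplicates
lemma pvPresent (S_set : List Int) :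
    (∀ x : Int, x ∈ PySem.List.sorted
        (PySem.Set.ofList (S_set.map (fun x => PySem.Int.mod x 47))) (fun x => x) false ↔
      0 ≤ x ∧ x < 47 ∧
        (PySem.List.pyGetD
          (S_set.foldl (fun ind x => PySem.List.pySetD ind (PySem.Int.mod x 47) 1)
            (List.replicate 47 (0 : Int))) x 0 != 0) = true) ∧
    (PySem.List.sorted
        (PySem.Set.ofList (S_set.map (fun x => PySem.Int.mod x 47))) (fun x => x) false).Nodup := by
  set L := S_set.map (fun x => PySem.Int.mod x 47) with hL
  have hLbound : ∀ x ∈ L, 0 ≤ x ∧ x < 47 := by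
    intro x hx
    rw [hL, List.mem_map] at hx
    obtain ⟨y, -, rfl⟩ := hx
    exact ⟨PySem.Int.mod_nonneg _ (by norm_num), PySem.Int.mod_lt _ (by norm_num)⟩
  have hind : S_set.foldl (fun ind x => PySem.List.pySetD ind (PySem.Int.mod x 47) 1)
      (List.replicate 47 (0 : Int)) =
      L.foldl (fun ind r => PySem.List.pySetD ind r 1) (List.replicate 47 (0 : Int)) := by
    rw [hL, List.foldl_map]
  have hget : ∀ x : Int, 0 ≤ x → x < 47 →
      ((PySem.List.pyGetD
        (S_set.foldl (fun ind x => PySem.List.pySetD ind (PySem.Int.mod x 47) 1)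
          (List.replicate 47 (0 : Int))) x 0 != 0) = true ↔ x ∈ L) := by
    intro x hx0 hx47
    rw [hind, PySem.List.pyGetD_of_nonneg _ _ hx0,
      pvFoldSet (fun _ => (1:Int)) x.toNat L _ (fun d hd => (hLbound d hd).1)]
    have hcast : ((x.toNat : Int)) = x := by omega
    have hlt : x.toNat < 47 := by omega
    rw [hcast]
    simp only [List.length_replicate]
    by_cases hm : x ∈ L
    · rw [if_pos ⟨hm, hlt⟩]
      simp [hm]
    · rw [if_neg (by simp [hm])]
      rw [List.getD_replicate _ hlt]
      simp [hm]
  constructor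
  · intro x
    rw [PySem.List.mem_sorted, PySem.Set.mem_ofList]
    constructor
    · intro hx
      obtain ⟨h0, h47⟩ := hLbound x hx
      exact ⟨h0, h47, (hget x h0 h47).mpr hx⟩
    · rintro ⟨h0, h47, hg⟩
      exact (hget x h0 h47).mp hg
  · exact ((PySem.List.sorted_perm _ _ _).symm).nodup (PySem.Set.nodup_ofList _)

-- ===== VERDICT (by name: the statement is the Claim_ definition above) =====
theorem compute_all_deltas_spec : Claim_equal_compute_all_deltas := by
  intro S_set _
  unfold Spec_compute_all_deltas compute_all_deltas compute_all_deltas_alt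
  exact pvCore _ _ (pvPresent S_set).1 (pvPresent S_set).2
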